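-- pv_equiv track=rewrite | github.com/netvigator/pyPacks | Crypto/many_time_pad.py | _getHexTuple
-- ===== SOURCE A (Python) =====
-- def _getHexTuple( sHexes ):
--     #
--     lHexes = []
--     #
--     lAdd = []
--     #
--     for s in sHexes:
--         #
--         lAdd.append( s )
--         #
--         if len( lAdd ) == 1: continue
--         #
--         lHexes.append( ''.join( lAdd ) )
--         #
--         lAdd = []
--         #
--     #
--     return tuple( lHexes )
-- ===== SOURCE B (Python) =====
-- def _getHexTuple(sHexes):
--     it = iter(sHexes)
--     return tuple(a + b for a, b in zip(it, it))
-- ===== Notes on version B (the rewrite author's own statement) =====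
-- stated objective: idiomatic
-- what changed: Replaces the manual buffer-accumulating loop with the standard zip(it, it) pairing idiom over a single iterator, which drops an unpaired trailing character exactly as A does.
import Mathlib
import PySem

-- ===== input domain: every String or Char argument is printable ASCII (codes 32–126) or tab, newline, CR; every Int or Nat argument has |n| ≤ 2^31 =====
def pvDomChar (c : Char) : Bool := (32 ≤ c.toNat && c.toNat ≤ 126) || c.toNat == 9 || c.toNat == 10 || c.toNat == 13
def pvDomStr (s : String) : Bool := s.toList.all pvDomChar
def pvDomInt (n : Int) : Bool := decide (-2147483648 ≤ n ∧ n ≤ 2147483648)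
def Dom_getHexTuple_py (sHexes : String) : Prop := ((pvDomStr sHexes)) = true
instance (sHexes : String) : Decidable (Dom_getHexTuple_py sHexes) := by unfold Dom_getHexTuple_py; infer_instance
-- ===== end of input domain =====

-- ===== PORT A =====
-- A: buffer-accumulating loop, state = (lHexes, lAdd)
def getHexTuple_py (sHexes : String) : List String :=
  (sHexes.toList.foldl
    (fun (st : List String × List Char) s =>
      let lAdd := st.2 ++ [s]
      if lAdd.length == 1 then (st.1, lAdd)
      else (st.1 ++ [String.ofList lAdd], []))
    ([], [])).1

-- ===== PORT B =====
-- B: zip(it, it) pairing — consume two characters at a time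
def pvPairs : List Char → List String
  | a :: b :: rest => String.ofList [a, b] :: pvPairs rest
  | _ => []

def getHexTuple_py_alt (sHexes : String) : List String := pvPairs sHexes.toList

-- ===== PRECONDITION & SPEC =====
def Spec_getHexTuple_py (sHexes : String) (out : List String) : Prop := out = getHexTuple_py_alt sHexes
instance (sHexes : String) (out : List String) : Decidable (Spec_getHexTuple_py sHexes out) := by unfold Spec_getHexTuple_py; infer_instance

-- ===== CLAIM (what is proved, stated in full; the proofs are below) =====
def Claim_equal_getHexTuple_py : Prop := ∀ (sHexes : String), Dom_getHexTuple_py sHexes → Spec_getHexTuple_py sHexes (getHexTuple_py sHexes)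

-- ===== LEMMAS AND PROOFS =====

-- ===== VERDICT (by name: the statement is the Claim_ definition above) =====
lemma pvFold_pairs (cs : List Char) (acc : List String) :
    (cs.foldl
      (fun (st : List String × List Char) s =>
        let lAdd := st.2 ++ [s]
        if lAdd.length == 1 then (st.1, lAdd)
        else (st.1 ++ [String.ofList lAdd], []))
      (acc, [])).1 = acc ++ pvPairs cs := by
  induction cs using pvPairs.induct generalizing acc with
  | case1 a b rest ih =>
    have hab : String.ofList [a] ++ String.ofList [b] = String.ofList [a, b] := by
      rw [← String.ofList_append]; rfl
    simpa [pvPairs, hab] using ih (acc ++ [String.ofList [a, b]])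
  | case2 cs h =>
    cases cs with
    | nil => simp [pvPairs]
    | cons a t =>
      cases t with
      | nil => simp [List.foldl, pvPairs]
      | cons b r => exact absurd rfl (h a b r)

theorem getHexTuple_py_spec : Claim_equal_getHexTuple_py := by
  intro s _
  unfold Spec_getHexTuple_py getHexTuple_py getHexTuple_py_alt
  simpa using pvFold_pairs s.toList []
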